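-- pv_equiv track=rewrite | github.com/hyemhyemmu/learning-CS | CS61A/3. lec/Data Examples.py | digit_dict
-- ===== SOURCE A (Python) =====
-- def digit_dict(s):
--     """
--     >>>digit_dict([5,8,13,21,34,55,89])
--     stuff
--     """
--     result = {}
--     for num in s:
--         last_digit = num % 10
--         if last_digit not in result:
--             result[last_digit] = [num]
--         else:
--             result[last_digit].append(num)
--     return result
-- ===== SOURCE B (Python) =====
-- def digit_dict(s):
--     digits = dict.fromkeys(num % 10 for num in s)
--     return {d: [num for num in s if num % 10 == d] for d in digits}
-- ===== Notes on version B (the rewrite author's own statement) =====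
-- stated objective: alternative
-- what changed: B replaces A's single-pass dict with incremental membership test and append by a two-pass decomposition: first an ordered dedup of the last digits (dict.fromkeys), then one filter pass per distinct digit via a dict comprehension; key order (first appearance) and per-key lists are identical.
import Mathlib
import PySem

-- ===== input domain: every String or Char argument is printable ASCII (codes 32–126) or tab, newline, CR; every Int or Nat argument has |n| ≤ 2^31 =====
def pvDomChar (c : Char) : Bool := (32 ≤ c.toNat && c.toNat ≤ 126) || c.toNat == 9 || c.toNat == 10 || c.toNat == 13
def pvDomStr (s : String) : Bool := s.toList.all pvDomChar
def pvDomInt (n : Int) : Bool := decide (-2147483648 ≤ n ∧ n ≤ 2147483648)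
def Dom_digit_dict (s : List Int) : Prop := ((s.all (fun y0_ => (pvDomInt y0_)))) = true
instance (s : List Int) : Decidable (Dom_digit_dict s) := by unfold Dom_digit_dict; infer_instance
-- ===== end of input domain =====

-- B replaces A's incremental dict-membership loop by a two-pass decomposition (dedup the last digits, then one filter per digit); objective: simpler, not faster.


-- ===== PORT A =====
-- result = {}; for num in s: ld = num % 10; if ld not in result: result[ld] = [num] else: result[ld].append(num)
def digit_dict (s : List Int) : List (Int × List Int) :=
  (s.foldl (fun result num =>
      let last_digit := PySem.Int.mod num 10
      if result.contains last_digit = false then result.insert last_digit [num]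
      else result.modify last_digit [] (fun l => l ++ [num]))
    PySem.Dict.empty).items

-- ===== PORT B =====
-- digits = dict.fromkeys(num % 10 for num in s)  (ordered dedup); then {d: [num for num in s if num % 10 == d] for d in digits}
def digit_dict_alt (s : List Int) : List (Int × List Int) :=
  let digits := PySem.List.dedup (s.map (fun num => PySem.Int.mod num 10))
  (digits.foldl (fun d dgt =>
      d.insert dgt (s.filter (fun num => PySem.Int.mod num 10 == dgt)))
    PySem.Dict.empty).items

-- ===== PRECONDITION & SPEC =====
def Spec_digit_dict (s : List Int) (out : List (Int × List Int)) : Prop := out = digit_dict_alt s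
instance (s : List Int) (out : List (Int × List Int)) : Decidable (Spec_digit_dict s out) := by unfold Spec_digit_dict; infer_instance

-- ===== CLAIM (what is proved, stated in full; the proofs are below) =====
def Claim_equal_digit_dict : Prop := ∀ (s : List Int), Dom_digit_dict s → Spec_digit_dict s (digit_dict s)

-- ===== LEMMAS AND PROOFS =====

-- a conditional write to a fresh key is the same modify-append step
theorem pv_modify_not_contains (d : PySem.Dict Int (List Int)) (k : Int) (v : Int)
    (h : d.contains k = false) : d.modify k [] (· ++ [v]) = d.insert k [v] := by
  simp only [PySem.Dict.modify, PySem.Dict.getD_of_not_contains d [] h]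
  simp

-- A's loop body, both branches, is one uniform modify-append step
theorem pv_A_dict_eq (s : List Int) :
    (s.foldl (fun result num =>
        let last_digit := PySem.Int.mod num 10
        if result.contains last_digit = false then result.insert last_digit [num]
        else result.modify last_digit [] (fun l => l ++ [num])) PySem.Dict.empty)
      = (s.map (fun num => (PySem.Int.mod num 10, num))).foldl
          (fun d p => d.modify p.1 [] (fun l => l ++ [p.2])) PySem.Dict.empty := by
  rw [List.foldl_map]
  apply PySem.List.foldl_congr_mem
  intro d num _
  cases hc : d.contains (PySem.Int.mod num 10)
  · rw [if_pos hc]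
    exact (pv_modify_not_contains d _ num hc).symm
  · rw [if_neg (by rw [hc]; simp)]

theorem pv_B_items (s : List Int) :
    digit_dict_alt s =
      (PySem.List.dedup (s.map (fun num => PySem.Int.mod num 10))).map
        (fun k => (k, s.filter (fun num => PySem.Int.mod num 10 == k))) := by
  show ((PySem.List.dedup (s.map (fun num => PySem.Int.mod num 10))).foldl (fun d dgt =>
      d.insert dgt (s.filter (fun num => PySem.Int.mod num 10 == dgt))) PySem.Dict.empty).items = _
  rw [PySem.Dict.items_foldl_insert_fresh
      (l := PySem.List.dedup (s.map (fun num => PySem.Int.mod num 10)))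
      (k := fun x => x)
      (v := fun dgt => s.filter (fun num => PySem.Int.mod num 10 == dgt))
      (d := PySem.Dict.empty)
      (fun a _ => PySem.Dict.contains_empty a)
      (by simp)]
  simp [PySem.Dict.empty]

-- ===== VERDICT (by name: the statement is the Claim_ definition above) =====
theorem digit_dict_spec : Claim_equal_digit_dict := by
  intro s _
  unfold Spec_digit_dict digit_dict
  rw [pv_A_dict_eq, pv_B_items]
  set pairs := s.map (fun num => (PySem.Int.mod num 10, num)) with hp
  set D := pairs.foldl (fun d p => d.modify p.1 [] (fun l => l ++ [p.2])) PySem.Dict.empty with hD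
  have hnd : D.keys.Nodup := by
    rw [hD]
    exact PySem.Dict.nodup_keys_foldl_modify_key pairs _ _ _ _ PySem.Dict.nodup_keys_empty
  have hkeys : D.keys = PySem.List.dedup (s.map (fun num => PySem.Int.mod num 10)) := by
    rw [hD, PySem.Dict.keys_foldl_modify_key]
    simp [hp, List.map_map, Function.comp_def, PySem.Dict.keys_empty, PySem.Set.update_nil_left]
  rw [PySem.Dict.items_eq_map_keys D hnd [], hkeys]
  apply List.map_congr_left
  intro k _
  have hg : D.getD k [] = (pairs.filter (fun p => p.1 == k)).map (·.2) := by
    rw [hD, PySem.Dict.getD_foldl_modify_append]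
    simp
  rw [hg, hp]
  simp [List.filter_map, Function.comp_def]
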